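-- pv_equiv track=rewrite | github.com/adnanaziz/EPIJudge | epi_judge_python_solutions/snake_string.py | snake_string
-- ===== SOURCE A (Python) =====
-- def snake_string(s: str) -> str:
--
--     result = []
--     # Outputs the first row, i.e., s[1], s[5], s[9], ...
--     for i in range(1, len(s), 4):
--         result.append(s[i])
--     # Outputs the second row, i.e., s[0], s[2], s[4], ...
--     for i in range(0, len(s), 2):
--         result.append(s[i])
--     # Outputs the third row, i.e., s[3], s[7], s[11], ...
--     for i in range(3, len(s), 4):
--         result.append(s[i])
--     return ''.join(result)
-- ===== SOURCE B (Python) =====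
-- def snake_string(s: str) -> str:
--     # One pass: dispatch each index into its row bucket, then concatenate rows.
--     first, middle, third = [], [], []
--     for i in range(len(s)):
--         if i % 4 == 1:
--             first.append(s[i])
--         elif i % 2 == 0:
--             middle.append(s[i])
--         elif i % 4 == 3:
--             third.append(s[i])
--     return ''.join(first + middle + third)
-- ===== Notes on version B (the rewrite author's own statement) =====
-- stated objective: alternative
-- what changed: Replaced A's three separate strided passes over the string by a single pass over all indices that dispatches each character into one of three row buckets (i%4==1 / even / i%4==3), joined row-by-row at the end.
import Mathlib
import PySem

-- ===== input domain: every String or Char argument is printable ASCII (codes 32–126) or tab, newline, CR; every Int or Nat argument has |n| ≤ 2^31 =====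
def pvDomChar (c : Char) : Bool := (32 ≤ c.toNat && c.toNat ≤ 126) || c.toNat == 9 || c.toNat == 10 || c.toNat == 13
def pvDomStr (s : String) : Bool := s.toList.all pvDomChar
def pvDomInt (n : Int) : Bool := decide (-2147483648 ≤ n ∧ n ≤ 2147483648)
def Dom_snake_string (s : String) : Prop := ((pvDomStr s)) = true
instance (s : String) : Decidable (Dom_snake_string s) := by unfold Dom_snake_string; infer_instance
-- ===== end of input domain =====

-- B replaces A's three strided passes by a single pass dispatching each index into one of three row buckets (alternative decomposition, same cost).


-- ===== PORT A =====
-- literal port of A: three strided index loops appending s[i] (always in range), then join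
def snake_string (s : String) : String :=
  let xs := s.toList
  let n : Int := xs.length
  let result : List Char := []
  let result := (PySem.List.pyRange 1 n 4).foldl
    (fun acc i => acc ++ [PySem.List.pyGetD xs i ' ']) result
  let result := (PySem.List.pyRange 0 n 2).foldl
    (fun acc i => acc ++ [PySem.List.pyGetD xs i ' ']) result
  let result := (PySem.List.pyRange 3 n 4).foldl
    (fun acc i => acc ++ [PySem.List.pyGetD xs i ' ']) result
  String.ofList result

-- ===== PORT B =====
-- literal port of B: one pass over range(len(s)) dispatching into (first, middle, third)
def snake_string_alt (s : String) : String :=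
  let xs := s.toList
  let n : Int := xs.length
  let st := (PySem.List.pyRange 0 n 1).foldl
    (fun (st : List Char × List Char × List Char) i =>
      if PySem.Int.mod i 4 == 1 then (st.1 ++ [PySem.List.pyGetD xs i ' '], st.2.1, st.2.2)
      else if PySem.Int.mod i 2 == 0 then (st.1, st.2.1 ++ [PySem.List.pyGetD xs i ' '], st.2.2)
      else if PySem.Int.mod i 4 == 3 then (st.1, st.2.1, st.2.2 ++ [PySem.List.pyGetD xs i ' '])
      else st)
    (([] : List Char), ([] : List Char), ([] : List Char))
  String.ofList (st.1 ++ st.2.1 ++ st.2.2)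

-- ===== PRECONDITION & SPEC =====
def Spec_snake_string (s : String) (out : String) : Prop := out = snake_string_alt s
instance (s : String) (out : String) : Decidable (Spec_snake_string s out) := by unfold Spec_snake_string; infer_instance

-- ===== CLAIM (what is proved, stated in full; the proofs are below) =====
def Claim_equal_snake_string : Prop := ∀ (s : String), Dom_snake_string s → Spec_snake_string s (snake_string s)

-- ===== LEMMAS AND PROOFS =====

-- two strictly increasing Int lists with the same members are equal
theorem pv_eq_of_mem_pairwise (l1 l2 : List Int)
    (h1 : l1.Pairwise (· < ·)) (h2 : l2.Pairwise (· < ·))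
    (hm : ∀ x, x ∈ l1 ↔ x ∈ l2) : l1 = l2 := by
  have n1 : l1.Nodup := h1.imp (fun h => ne_of_lt h)
  have n2 : l2.Nodup := h2.imp (fun h => ne_of_lt h)
  have hp : l1.Perm l2 := by
    apply List.perm_of_nodup_nodup_toFinset_eq n1 n2
    ext x; simp [hm x]
  exact List.Perm.eq_of_pairwise
    (fun a b _ _ hab hba => absurd hba (lt_asymm hab)) h1 h2 hp

theorem pv_pairwise_lt_pyRange_pos (a b : Int) {s : Int} (hs : 0 < s) :
    (PySem.List.pyRange a b s).Pairwise (· < ·) := by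
  rw [PySem.List.pyRange_of_pos a b hs]
  refine List.Pairwise.map _ (fun x y (h : x < y) => ?_) (List.pairwise_lt_range)
  have : s * (x : Int) < s * (y : Int) := by
    apply mul_lt_mul_of_pos_left _ hs
    exact_mod_cast h
  omega

-- B's single-pass fold produces exactly the three filtered bucket lists
theorem pv_fold_buckets (xs : List Char) (r : List Int) (f m t : List Char) :
    r.foldl
      (fun (st : List Char × List Char × List Char) i =>
        if PySem.Int.mod i 4 == 1 then (st.1 ++ [PySem.List.pyGetD xs i ' '], st.2.1, st.2.2)
        else if PySem.Int.mod i 2 == 0 then (st.1, st.2.1 ++ [PySem.List.pyGetD xs i ' '], st.2.2)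
        else if PySem.Int.mod i 4 == 3 then (st.1, st.2.1, st.2.2 ++ [PySem.List.pyGetD xs i ' '])
        else st)
      (f, m, t)
    = (f ++ (r.filter (fun i => PySem.Int.mod i 4 == 1)).map (fun i => PySem.List.pyGetD xs i ' '),
       m ++ (r.filter (fun i => !(PySem.Int.mod i 4 == 1) && PySem.Int.mod i 2 == 0)).map (fun i => PySem.List.pyGetD xs i ' '),
       t ++ (r.filter (fun i => !(PySem.Int.mod i 4 == 1) && !(PySem.Int.mod i 2 == 0) && PySem.Int.mod i 4 == 3)).map (fun i => PySem.List.pyGetD xs i ' ')) := by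
  induction r generalizing f m t with
  | nil => simp
  | cons a r ih =>
    rw [List.foldl_cons, List.filter_cons, List.filter_cons, List.filter_cons]
    by_cases h1 : (PySem.Int.mod a 4 == 1) = true
    · rw [if_pos h1, ih]
      have h1' : a % 4 = 1 := by simpa using h1
      simp [h1']
    · have h1' : ¬(a % 4 = 1) := by simpa using h1
      by_cases h2 : (PySem.Int.mod a 2 == 0) = true
      · rw [if_neg h1, if_pos h2, ih]
        have h2' : (2:Int) ∣ a := by simpa using h2
        simp [h1', h2']
      · have h2' : ¬((2:Int) ∣ a) := by simpa using h2
        have h2'' : a % 2 = 1 := by omega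
        by_cases h3 : (PySem.Int.mod a 4 == 3) = true
        · rw [if_neg h1, if_neg h2, if_pos h3, ih]
          have h3' : a % 4 = 3 := by simpa using h3
          simp [h2'', h3']
        · rw [if_neg h1, if_neg h2, if_neg h3, ih]
          have h3' : ¬(a % 4 = 3) := by simpa using h3
          simp [h1', h2'', h3']

theorem pv_filter_first (n : Int) :
    (PySem.List.pyRange 0 n 1).filter (fun i => PySem.Int.mod i 4 == 1)
      = PySem.List.pyRange 1 n 4 := by
  apply pv_eq_of_mem_pairwise
  · exact List.Pairwise.sublist (List.filter_sublist) (PySem.List.pairwise_lt_pyRange_one 0 n)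
  · exact pv_pairwise_lt_pyRange_pos 1 n (by omega)
  · intro x
    simp [List.mem_filter, PySem.List.mem_pyRange_one,
      PySem.List.mem_pyRange_iff_of_pos (show (0:Int) < 4 by omega)]
    omega

theorem pv_filter_middle (n : Int) :
    (PySem.List.pyRange 0 n 1).filter (fun i => !(PySem.Int.mod i 4 == 1) && PySem.Int.mod i 2 == 0)
      = PySem.List.pyRange 0 n 2 := by
  apply pv_eq_of_mem_pairwise
  · exact List.Pairwise.sublist (List.filter_sublist) (PySem.List.pairwise_lt_pyRange_one 0 n)
  · exact pv_pairwise_lt_pyRange_pos 0 n (by omega)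
  · intro x
    simp [List.mem_filter, PySem.List.mem_pyRange_one,
      PySem.List.mem_pyRange_iff_of_pos (show (0:Int) < 2 by omega)]
    omega

theorem pv_filter_third (n : Int) :
    (PySem.List.pyRange 0 n 1).filter
        (fun i => !(PySem.Int.mod i 4 == 1) && !(PySem.Int.mod i 2 == 0) && PySem.Int.mod i 4 == 3)
      = PySem.List.pyRange 3 n 4 := by
  apply pv_eq_of_mem_pairwise
  · exact List.Pairwise.sublist (List.filter_sublist) (PySem.List.pairwise_lt_pyRange_one 0 n)
  · exact pv_pairwise_lt_pyRange_pos 3 n (by omega)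
  · intro x
    simp [List.mem_filter, PySem.List.mem_pyRange_one,
      PySem.List.mem_pyRange_iff_of_pos (show (0:Int) < 4 by omega)]
    omega

-- ===== VERDICT (by name: the statement is the Claim_ definition above) =====
theorem snake_string_spec : Claim_equal_snake_string := by
  intro s _
  unfold Spec_snake_string snake_string snake_string_alt
  dsimp only
  rw [pv_fold_buckets, pv_filter_first, pv_filter_middle, pv_filter_third]
  simp only [PySem.List.foldl_append_singleton_eq_map, List.nil_append, List.append_assoc]
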